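-- pv_equiv track=rewrite | github.com/QlukvaCup/crossfit-scoreboard | storage.py | _normalize_clubs
-- ===== SOURCE A (Python) =====
-- from typing import Dict, Any, List
--
-- def _normalize_clubs(raw: Any) -> List[str]:
--     items = raw if isinstance(raw, list) else []
--     cleaned: List[str] = []
--     seen = set()
--     for item in items:
--         name = str(item or "").strip()
--         if not name:
--             continue
--         key = name.casefold()
--         if key in seen:
--             continue
--         seen.add(key)
--         cleaned.append(name)
--     cleaned.sort(key=lambda x: x.casefold())
--     return cleaned
-- ===== SOURCE B (Python) =====
-- from typing import Any, List
--
-- def _normalize_clubs(raw: Any) -> List[str]: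
--     items = raw if isinstance(raw, list) else []
--     cleaned = [name for name in (str(item or "").strip() for item in items) if name]
--     cleaned.sort(key=str.casefold)
--     out: List[str] = []
--     prev = None
--     for name in cleaned:
--         k = name.casefold()
--         if k != prev:
--             out.append(name)
--             prev = k
--     return out
-- ===== Notes on version B (the rewrite author's own statement) =====
-- stated objective: alternative
-- what changed: B keeps all cleaned non-empty names (duplicates included), stably sorts them by casefold, and deduplicates with a single prev-key scan over the sorted list, instead of A's seen-set first-occurrence dedup followed by a sort.
import Mathlib
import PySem

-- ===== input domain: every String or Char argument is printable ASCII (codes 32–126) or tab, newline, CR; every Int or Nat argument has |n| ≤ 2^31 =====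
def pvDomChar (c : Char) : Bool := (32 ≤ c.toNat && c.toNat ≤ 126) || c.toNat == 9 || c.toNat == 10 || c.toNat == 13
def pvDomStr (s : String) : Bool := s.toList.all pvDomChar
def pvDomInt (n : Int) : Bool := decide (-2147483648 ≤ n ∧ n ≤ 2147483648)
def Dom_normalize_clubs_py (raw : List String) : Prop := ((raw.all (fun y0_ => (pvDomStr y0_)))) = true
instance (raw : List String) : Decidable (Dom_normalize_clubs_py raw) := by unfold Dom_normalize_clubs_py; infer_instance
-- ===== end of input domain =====

-- B cleans the names, stably sorts them by casefold, then drops adjacent casefold-duplicates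
-- in one scan — no `seen` set is maintained (objective: alternative decomposition, same cost).


-- ===== PORT A =====
-- `raw` is typed List String, so `isinstance(raw, list)` is always true and `items = raw`;
-- `str(item or "")` on a string is `item` if nonempty else `""`; `.casefold()` is ported as
-- PySem.Str.lower, exact on the printable-ASCII domain.
def normalize_clubs_py (raw : List String) : List String :=
  let items := raw
  let st := items.foldl
    (fun (acc : List String × PySem.Set String) item =>
      let name := PySem.Str.strip (if item == "" then "" else item)
      if name == "" then acc
      else
        let key := PySem.Str.lower name
        if PySem.Set.contains acc.2 key then acc
        else (acc.1 ++ [name], PySem.Set.add acc.2 key))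
    ([], PySem.Set.empty)
  PySem.List.sorted st.1 (fun x => PySem.Str.lower x) false

-- ===== PORT B =====
-- the `prev`-key loop of Source B: keep a name iff its casefold key differs from the previous one
def pvBLoop (l : List String) (out : List String) (prev : Option String) : List String :=
  match l with
  | [] => out
  | name :: rest =>
    let k := PySem.Str.lower name
    if some k ≠ prev then pvBLoop rest (out ++ [name]) (some k)
    else pvBLoop rest out prev

def normalize_clubs_py_alt (raw : List String) : List String :=
  let items := raw
  let cleaned := (items.map (fun item => PySem.Str.strip (if item == "" then "" else item))).filter
      (fun name => !(name == ""))
  let sortedNames := PySem.List.sorted cleaned (fun x => PySem.Str.lower x) false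
  pvBLoop sortedNames [] none

-- ===== PRECONDITION & SPEC =====
def Spec_normalize_clubs_py (raw : List String) (out : List String) : Prop := out = normalize_clubs_py_alt raw
instance (raw : List String) (out : List String) : Decidable (Spec_normalize_clubs_py raw out) := by unfold Spec_normalize_clubs_py; infer_instance

-- ===== CLAIM (what is proved, stated in full; the proofs are below) =====
def Claim_equal_normalize_clubs_py : Prop := ∀ (raw : List String), Dom_normalize_clubs_py raw → Spec_normalize_clubs_py raw (normalize_clubs_py raw)

-- ===== LEMMAS AND PROOFS =====

-- the casefold key
def pvKey (x : String) : String := PySem.Str.lower x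

-- the cleaned list: stripped names, empties removed
def pvClean (raw : List String) : List String :=
  (raw.map (fun item => PySem.Str.strip (if item == "" then "" else item))).filter
    (fun name => !(name == ""))

-- structural model of A's dedup loop
def pvFirstOcc (seen : PySem.Set String) : List String → List String
  | [] => []
  | x :: t =>
    if pvKey x ∈ seen then pvFirstOcc seen t
    else x :: pvFirstOcc (PySem.Set.add seen (pvKey x)) t

-- structural model of B's prev-key loop
def pvDedup (prev : Option String) : List String → List String
  | [] => []
  | x :: t =>
    if some (pvKey x) = prev then pvDedup prev t
    else x :: pvDedup (some (pvKey x)) t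

-- A's loop body, named for the proofs (definitionally A's lambda)
def pvAStep (acc : List String × PySem.Set String) (item : String) :
    List String × PySem.Set String :=
  let name := PySem.Str.strip (if item == "" then "" else item)
  if name == "" then acc
  else
    let key := PySem.Str.lower name
    if PySem.Set.contains acc.2 key then acc
    else (acc.1 ++ [name], PySem.Set.add acc.2 key)

-- A's fold equals pvFirstOcc on the cleaned list
theorem pvA_loop (raw : List String) (out : List String) (seen : PySem.Set String) :
    (raw.foldl pvAStep (out, seen)).1 = out ++ pvFirstOcc seen (pvClean raw) := by
  induction raw generalizing out seen with
  | nil => simp [pvClean, pvFirstOcc]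
  | cons item rest ih =>
    rw [List.foldl_cons]
    by_cases h : PySem.Str.strip (if item = "" then "" else item) = ""
    · have hstep : pvAStep (out, seen) item = (out, seen) := by simp [pvAStep, h]
      rw [hstep, ih]
      have hcl : pvClean (item :: rest) = pvClean rest := by simp [pvClean, h]
      rw [hcl]
    · by_cases hc : pvKey (PySem.Str.strip (if item = "" then "" else item)) ∈ seen
      · have hstep : pvAStep (out, seen) item = (out, seen) := by
          simp [pvAStep, h, PySem.Set.contains]
          exact hc
        rw [hstep, ih]
        have hcl : pvClean (item :: rest) =
            PySem.Str.strip (if item = "" then "" else item) :: pvClean rest := by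
          simp [pvClean, h]
        rw [hcl, pvFirstOcc, if_pos hc]
      · have hstep : pvAStep (out, seen) item =
            (out ++ [PySem.Str.strip (if item = "" then "" else item)],
              PySem.Set.add seen (pvKey (PySem.Str.strip (if item = "" then "" else item)))) := by
          have hc' : PySem.Str.lower (PySem.Str.strip (if item = "" then "" else item)) ∉ seen := hc
          simp [pvAStep, h, PySem.Set.contains, hc', pvKey]
        rw [hstep, ih]
        have hcl : pvClean (item :: rest) =
            PySem.Str.strip (if item = "" then "" else item) :: pvClean rest := by
          simp [pvClean, h]
        rw [hcl, pvFirstOcc, if_neg hc, List.append_assoc]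
        rfl

-- B's loop equals pvDedup
theorem pvB_loop (l : List String) (out : List String) (prev : Option String) :
    pvBLoop l out prev = out ++ pvDedup prev l := by
  induction l generalizing out prev with
  | nil => simp [pvBLoop, pvDedup]
  | cons x t ih =>
    simp only [pvBLoop, pvDedup, ne_eq, ite_not, ih, pvKey]
    split <;> simp

-- insertBy (with the casefold-key comparator) preserves key-sortedness
theorem pv_insertBy_pairwise (x : String) (acc : List String)
    (h : acc.Pairwise (fun a b => pvKey a ≤ pvKey b)) :
    (PySem.List.insertBy (fun a b => decide (pvKey a < pvKey b)) x acc).Pairwise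
      (fun a b => pvKey a ≤ pvKey b) := by
  induction acc with
  | nil => simp [PySem.List.insertBy]
  | cons y ys ih =>
    rcases List.pairwise_cons.mp h with ⟨hy, hys⟩
    by_cases hlt : pvKey x < pvKey y
    · simp only [PySem.List.insertBy, hlt, decide_true, if_true]
      refine List.pairwise_cons.mpr ⟨?_, h⟩
      intro z hz
      rcases List.mem_cons.mp hz with rfl | hz
      · exact le_of_lt hlt
      · exact le_trans (le_of_lt hlt) (hy z hz)
    · simp only [PySem.List.insertBy, hlt, decide_false, Bool.false_eq_true, if_false]
      refine List.pairwise_cons.mpr ⟨?_, ih hys⟩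
      intro z hz
      rcases (PySem.List.mem_insertBy _ x z ys).mp hz with rfl | hz
      · exact le_of_not_gt hlt
      · exact hy z hz

-- filter-at-a-key through one insertion (stability, one step)
theorem pv_insertBy_filter (x : String) (k : String) (acc : List String)
    (h : acc.Pairwise (fun a b => pvKey a ≤ pvKey b)) :
    (PySem.List.insertBy (fun a b => decide (pvKey a < pvKey b)) x acc).filter
        (fun y => decide (pvKey y = k)) =
      acc.filter (fun y => decide (pvKey y = k)) ++ (if pvKey x = k then [x] else []) := by
  induction acc with
  | nil => by_cases hk : pvKey x = k <;> simp [PySem.List.insertBy, hk]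
  | cons y ys ih =>
    rcases List.pairwise_cons.mp h with ⟨hy, hys⟩
    by_cases hlt : pvKey x < pvKey y
    · simp only [PySem.List.insertBy, hlt, decide_true, if_true]
      by_cases hk : pvKey x = k
      · have hys' : (y :: ys).filter (fun y => decide (pvKey y = k)) = [] := by
          rw [List.filter_eq_nil_iff]
          intro z hz
          have : pvKey x < pvKey z := by
            rcases List.mem_cons.mp hz with rfl | hz
            · exact hlt
            · exact lt_of_lt_of_le hlt (hy z hz)
          simp only [decide_eq_true_eq]
          intro hzk
          exact absurd (hzk ▸ this) (by simp [hk])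
        simp [hk, hys']
      · simp [hk]
    · simp only [PySem.List.insertBy, hlt, decide_false, Bool.false_eq_true, if_false]
      rw [List.filter_cons, List.filter_cons, ih hys]
      by_cases hyk : pvKey y = k <;> simp [hyk]

-- stability of the insertion-sort fold: filtering at one key commutes with sorting
theorem pv_foldl_filter (xs : List String) (k : String) (acc : List String)
    (h : acc.Pairwise (fun a b => pvKey a ≤ pvKey b)) :
    (xs.foldl (fun acc x => PySem.List.insertBy (fun a b => decide (pvKey a < pvKey b)) x acc)
        acc).filter (fun y => decide (pvKey y = k)) =
      acc.filter (fun y => decide (pvKey y = k)) ++ xs.filter (fun y => decide (pvKey y = k)) := by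
  induction xs generalizing acc with
  | nil => simp
  | cons x t ih =>
    simp only [List.foldl_cons]
    rw [ih _ (pv_insertBy_pairwise x acc h), pv_insertBy_filter x k acc h, List.filter_cons]
    by_cases hk : pvKey x = k <;> simp [hk]

-- stability of PySem's sort at each key
theorem pv_sorted_filter (xs : List String) (k : String) :
    (PySem.List.sorted xs pvKey false).filter (fun y => decide (pvKey y = k)) =
      xs.filter (fun y => decide (pvKey y = k)) := by
  rw [PySem.List.sorted_eq_foldl_insertBy]
  simpa using pv_foldl_filter xs k [] (List.Pairwise.nil)

-- membership in A's dedup result: the first occurrence of each unseen key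
theorem pv_firstOcc_mem (xs : List String) (seen : PySem.Set String) (a : String) :
    a ∈ pvFirstOcc seen xs ↔
      pvKey a ∉ seen ∧ (xs.filter (fun y => decide (pvKey y = pvKey a))).head? = some a := by
  induction xs generalizing seen with
  | nil => simp [pvFirstOcc]
  | cons x t ih =>
    by_cases hk : pvKey x = pvKey a
    · have hfil : ((x :: t).filter (fun y => decide (pvKey y = pvKey a))).head? = some x := by
        simp [hk]
      rw [hfil]
      by_cases hx : pvKey x ∈ seen
      · rw [pvFirstOcc, if_pos hx]
        constructor
        · intro hmem
          exact absurd (hk ▸ hx) ((ih seen).mp hmem).1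
        · rintro ⟨hns, _⟩
          exact absurd (hk ▸ hx) hns
      · rw [pvFirstOcc, if_neg hx]
        constructor
        · intro hmem
          rcases List.mem_cons.mp hmem with rfl | hmem'
          · exact ⟨hk ▸ hx, rfl⟩
          · rcases (ih _).mp hmem' with ⟨hns, _⟩
            exact absurd ((PySem.Set.mem_add seen (pvKey x) (pvKey a)).mpr (Or.inr hk.symm)) hns
        · rintro ⟨_, ha⟩
          have hxa : x = a := by injection ha
          exact List.mem_cons.mpr (Or.inl hxa.symm)
    · have hfil : (x :: t).filter (fun y => decide (pvKey y = pvKey a)) =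
          t.filter (fun y => decide (pvKey y = pvKey a)) := by
        simp [hk]
      rw [hfil]
      have hax : a ≠ x := fun h => hk (congrArg pvKey h.symm)
      by_cases hx : pvKey x ∈ seen
      · rw [pvFirstOcc, if_pos hx]
        exact ih seen
      · rw [pvFirstOcc, if_neg hx, List.mem_cons]
        constructor
        · rintro (h | hmem')
          · exact absurd h hax
          · rcases (ih _).mp hmem' with ⟨hns, hh⟩
            exact ⟨fun hmem'' => hns ((PySem.Set.mem_add _ _ _).mpr (Or.inl hmem'')), hh⟩
        · rintro ⟨hns, hh⟩
          refine Or.inr ((ih _).mpr ⟨fun hmem'' => ?_, hh⟩)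
          rcases (PySem.Set.mem_add seen (pvKey x) (pvKey a)).mp hmem'' with h' | h'
          · exact hns h'
          · exact hk h'.symm

-- A's dedup result has no duplicates
theorem pv_firstOcc_nodup (xs : List String) (seen : PySem.Set String) :
    (pvFirstOcc seen xs).Nodup := by
  induction xs generalizing seen with
  | nil => simp [pvFirstOcc]
  | cons x t ih =>
    by_cases hx : pvKey x ∈ seen
    · simpa [pvFirstOcc, hx] using ih seen
    · simp only [pvFirstOcc, if_neg hx, List.nodup_cons]
      refine ⟨fun hmem => ?_, ih _⟩
      rcases (pv_firstOcc_mem t _ x).mp hmem with ⟨hns, _⟩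
      exact hns ((PySem.Set.mem_add seen (pvKey x) (pvKey x)).mpr (Or.inr rfl))

-- B's dedup of a key-sorted list: strictly increasing keys, and each member is the
-- head of the run of its own key
theorem pv_dedup_sorted (l : List String) (prev : Option String)
    (hs : l.Pairwise (fun a b => pvKey a ≤ pvKey b))
    (hp : ∀ p, prev = some p → ∀ x ∈ l, p ≤ pvKey x) :
    (pvDedup prev l).Pairwise (fun a b => pvKey a < pvKey b) ∧
      ∀ a, a ∈ pvDedup prev l ↔
        prev ≠ some (pvKey a) ∧ (l.filter (fun y => decide (pvKey y = pvKey a))).head? = some a := by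
  induction l generalizing prev with
  | nil => simp [pvDedup]
  | cons x t ih =>
    rcases List.pairwise_cons.mp hs with ⟨hx, ht⟩
    by_cases hpx : some (pvKey x) = prev
    · have hp' : ∀ p, prev = some p → ∀ y ∈ t, p ≤ pvKey y := by
        rintro p rfl y hy
        have hxp : pvKey x = p := by injection hpx
        exact hxp ▸ hx y hy
      rcases ih prev ht hp' with ⟨hpair, hmem⟩
      refine ⟨by simpa [pvDedup, hpx] using hpair, fun a => ?_⟩
      rw [pvDedup, if_pos hpx]
      by_cases hk : pvKey x = pvKey a
      · rw [hmem a]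
        have hpa : prev = some (pvKey a) := hk ▸ hpx.symm
        constructor
        · rintro ⟨hne, _⟩
          exact absurd hpa hne
        · rintro ⟨hne, _⟩
          exact absurd hpa hne
      · have hfil : (x :: t).filter (fun y => decide (pvKey y = pvKey a)) =
            t.filter (fun y => decide (pvKey y = pvKey a)) := by
          simp [hk]
        rw [hmem a, hfil]
    · have hp' : ∀ p, some (pvKey x) = some p → ∀ y ∈ t, p ≤ pvKey y := by
        rintro p hpeq y hy
        have hxp : pvKey x = p := by injection hpeq
        exact hxp ▸ hx y hy
      rcases ih (some (pvKey x)) ht hp' with ⟨hpair, hmem⟩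
      have hlt : ∀ a ∈ pvDedup (some (pvKey x)) t, pvKey x < pvKey a := by
        intro a ha
        rcases (hmem a).mp ha with ⟨hne, hh⟩
        have hamem : a ∈ t := List.mem_of_mem_filter (List.mem_of_mem_head? hh)
        exact lt_of_le_of_ne (hx a hamem) (fun h => hne (by rw [h]))
      constructor
      · rw [pvDedup, if_neg hpx]
        exact List.pairwise_cons.mpr ⟨hlt, hpair⟩
      · intro a
        rw [pvDedup, if_neg hpx, List.mem_cons]
        by_cases hk : pvKey x = pvKey a
        · have hfil : ((x :: t).filter (fun y => decide (pvKey y = pvKey a))).head? = some x := by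
            simp [hk]
          rw [hfil]
          constructor
          · rintro (h | hmem')
            · exact ⟨fun hpa => hpx (hk ▸ hpa.symm), congrArg some h.symm⟩
            · rcases (hmem a).mp hmem' with ⟨hne, _⟩
              exact absurd (congrArg some hk) hne
          · rintro ⟨_, ha⟩
            have hxa : x = a := by injection ha
            exact Or.inl hxa.symm
        · have hfil : (x :: t).filter (fun y => decide (pvKey y = pvKey a)) =
              t.filter (fun y => decide (pvKey y = pvKey a)) := by
            simp [hk]
          rw [hfil]
          have hax : a ≠ x := fun h => hk (congrArg pvKey h.symm)
          constructor
          · rintro (h | hmem')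
            · exact absurd h hax
            · rcases (hmem a).mp hmem' with ⟨hne, hh⟩
              have hamem : a ∈ t := List.mem_of_mem_filter (List.mem_of_mem_head? hh)
              refine ⟨fun hpeq => ?_, hh⟩
              have h1 : pvKey a ≤ pvKey x := hp (pvKey a) hpeq x (List.mem_cons_self)
              have h2 : pvKey x ≤ pvKey a := hx a hamem
              exact hk (le_antisymm h2 h1)
          · rintro ⟨_, hh⟩
            refine Or.inr ((hmem a).mpr ⟨fun heq => ?_, hh⟩)
            have : pvKey x = pvKey a := by injection heq
            exact hk this

theorem normalize_clubs_py_eq (raw : List String) :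
    normalize_clubs_py raw = normalize_clubs_py_alt raw := by
  have hA : normalize_clubs_py raw =
      PySem.List.sorted (pvFirstOcc PySem.Set.empty (pvClean raw)) pvKey false := by
    show PySem.List.sorted (raw.foldl pvAStep ([], PySem.Set.empty)).1
        (fun x => PySem.Str.lower x) false = _
    rw [pvA_loop raw [] PySem.Set.empty]
    rfl
  have hB : normalize_clubs_py_alt raw =
      pvDedup none (PySem.List.sorted (pvClean raw) pvKey false) := by
    show pvBLoop _ [] none = _
    rw [pvB_loop]
    rfl
  rw [hA, hB]
  set xs := pvClean raw with hxs
  set S := PySem.List.sorted xs pvKey false with hS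
  have hSp : S.Pairwise (fun a b => pvKey a ≤ pvKey b) := PySem.List.sorted_pairwise xs pvKey
  rcases pv_dedup_sorted S none hSp (by rintro p ⟨⟩) with ⟨hpair, hmem⟩
  have hmemiff : ∀ a, a ∈ pvDedup none S ↔ a ∈ pvFirstOcc PySem.Set.empty xs := by
    intro a
    rw [hmem a, pv_firstOcc_mem xs PySem.Set.empty a, hS, pv_sorted_filter]
    simp [PySem.Set.empty]
  have hnodupR : (pvDedup none S).Nodup :=
    hpair.imp (fun hlt => ne_of_apply_ne pvKey (ne_of_lt hlt))
  have hperm : (pvDedup none S).Perm (pvFirstOcc PySem.Set.empty xs) :=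
    (List.perm_ext_iff_of_nodup hnodupR (pv_firstOcc_nodup xs _)).mpr hmemiff
  exact PySem.List.sorted_eq_of_perm_of_pairwise_lt _ _ pvKey hperm hpair

-- ===== VERDICT (by name: the statement is the Claim_ definition above) =====
theorem normalize_clubs_py_spec : Claim_equal_normalize_clubs_py := by
  intro raw _
  unfold Spec_normalize_clubs_py
  exact normalize_clubs_py_eq raw
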